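-- pv_equiv track=rewrite | github.com/kibutan/Atcoder | typical90/067 - Base 8 to 9（★2）.py | dec2nin
-- ===== SOURCE A (Python) =====
-- def dec2nin(n):
--     digit = 0
--     for i in range(22):
--         if(n >= 9 ** i):digit += 1
--         else:break
--
--     n_nin = 0
--     for i in range(digit):
--         if(n >= 9**(digit-(i+1))):
--             n_nin += n//9**(digit-(i+1)) * (10**(digit-(i+1)))
--             n %= 9**(digit-(i+1))
--     return n_nin
-- ===== SOURCE B (Python) =====
-- def dec2nin(n):
--     res = 0
--     place = 1
--     while n > 0:
--         res += (n % 9) * place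
--         n //= 9
--         place *= 10
--     return res
-- ===== Notes on version B (the rewrite author's own statement) =====
-- stated objective: idiomatic
-- what changed: Replaces A's two passes (count the base-9 digit length, then extract digits most-significant-first with per-digit powers 9**e and 10**e) by the standard single least-significant-first loop accumulating n%9 times a growing decimal place.
import Mathlib
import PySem

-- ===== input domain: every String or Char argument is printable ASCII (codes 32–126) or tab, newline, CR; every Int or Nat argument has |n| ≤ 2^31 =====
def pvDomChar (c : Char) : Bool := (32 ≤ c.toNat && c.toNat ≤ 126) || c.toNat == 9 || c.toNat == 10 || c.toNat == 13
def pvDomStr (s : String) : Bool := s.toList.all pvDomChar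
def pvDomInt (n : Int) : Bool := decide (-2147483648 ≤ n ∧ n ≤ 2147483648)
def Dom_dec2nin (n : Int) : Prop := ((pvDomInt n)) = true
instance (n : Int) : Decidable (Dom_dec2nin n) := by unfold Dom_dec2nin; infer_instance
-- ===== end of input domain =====

-- B replaces A's two-pass count-digits-then-extract-MSB conversion by a single
-- least-significant-digit-first accumulation loop (idiomatic base conversion).

-- ===== PORT A =====
-- first loop of A: 'for i in range(22): if n >= 9**i: digit += 1 else: break'
-- (the break is ported as structural recursion over the range list)
def dec2ninDigitLoop (n : Int) : List Int → Int → Int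
  | [], digit => digit
  | i :: rest, digit =>
      if n ≥ 9 ^ i.toNat then dec2ninDigitLoop n rest (digit + 1) else digit

-- one iteration of A's second loop; the exponent digit-(i+1) is ≥ 0 whenever the
-- loop runs, so '9 ** (digit-(i+1))' is ported as '9 ^ (digit-(i+1)).toNat'
def dec2ninStep (digit : Int) (st : Int × Int) (i : Int) : Int × Int :=
  if st.1 ≥ 9 ^ (digit - (i + 1)).toNat then
    (PySem.Int.mod st.1 (9 ^ (digit - (i + 1)).toNat),
     st.2 + PySem.Int.floordiv st.1 (9 ^ (digit - (i + 1)).toNat) * 10 ^ (digit - (i + 1)).toNat)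
  else st

def dec2nin (n : Int) : Int :=
  let digit := dec2ninDigitLoop n (PySem.List.pyRange 0 22 1) 0
  ((PySem.List.pyRange 0 digit 1).foldl (dec2ninStep digit) (n, 0)).2

-- ===== PORT B =====
-- 'while n > 0: res += (n % 9) * place; n //= 9; place *= 10'
def dec2ninAltLoop (n res place : Int) : Int :=
  if h : n > 0 then
    dec2ninAltLoop (PySem.Int.floordiv n 9) (res + PySem.Int.mod n 9 * place) (place * 10)
  else res
termination_by n.toNat
decreasing_by
  simp only [PySem.Int.floordiv_eq_ediv_of_pos (by norm_num : (0:Int) < 9)]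
  omega

def dec2nin_alt (n : Int) : Int := dec2ninAltLoop n 0 1

-- ===== PRECONDITION & SPEC =====
def Spec_dec2nin (n : Int) (out : Int) : Prop := out = dec2nin_alt n
instance (n : Int) (out : Int) : Decidable (Spec_dec2nin n out) := by unfold Spec_dec2nin; infer_instance

-- ===== CLAIM (what is proved, stated in full; the proofs are below) =====
def Claim_equal_dec2nin : Prop := ∀ (n : Int), Dom_dec2nin n → Spec_dec2nin n (dec2nin n)

-- ===== LEMMAS AND PROOFS =====

-- the common value: base-9 digits of m read as a decimal number, LSB-first recursion
def nineRep (m : Nat) : Int :=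
  if h : m = 0 then 0 else ((m % 9 : Nat) : Int) + 10 * nineRep (m / 9)
decreasing_by exact Nat.div_lt_self (Nat.pos_of_ne_zero h) (by norm_num)

lemma nineRep_unfold (m : Nat) : nineRep m = ((m % 9 : Nat) : Int) + 10 * nineRep (m / 9) := by
  by_cases h : m = 0
  · subst h; simp [nineRep]
  · rw [nineRep]; simp [h]

lemma nineRep_split (d : Nat) : ∀ m : Nat, m < 9 ^ (d + 1) →
    nineRep m = ((m / 9 ^ d : Nat) : Int) * 10 ^ d + nineRep (m % 9 ^ d) := by
  induction d with
  | zero =>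
      intro m hm
      simp only [pow_zero, Nat.div_one, Nat.mod_one]
      rw [nineRep_unfold m]
      have h9 : m % 9 = m := Nat.mod_eq_of_lt (by simpa using hm)
      have h0 : m / 9 = 0 := Nat.div_eq_of_lt (by simpa using hm)
      simp [h9, h0, nineRep]
  | succ d ih =>
      intro m hm
      have hdiv : m / 9 < 9 ^ (d + 1) := by
        rw [Nat.div_lt_iff_lt_mul (by norm_num)]
        calc m < 9 ^ (d + 2) := hm
        _ = 9 ^ (d + 1) * 9 := by ring
      have e1 : m % 9 ^ (d + 1) % 9 = m % 9 :=
        Nat.mod_mod_of_dvd m (dvd_pow_self 9 (Nat.succ_ne_zero d))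
      have e2 : m % 9 ^ (d + 1) / 9 = m / 9 % 9 ^ d := by
        have := Nat.mod_mul_right_div_self m 9 (9 ^ d)
        simpa [pow_succ, mul_comm] using this
      have e3 : m / 9 ^ (d + 1) = m / 9 / 9 ^ d := by
        rw [Nat.div_div_eq_div_mul]
        congr 1
        ring
      rw [nineRep_unfold m, ih (m / 9) hdiv, nineRep_unfold (m % 9 ^ (d + 1)), e1, e2, e3]
      push_cast
      ring

-- ---- B side ----

lemma altLoop_nonpos (n res place : Int) (h : n ≤ 0) : dec2ninAltLoop n res place = res := by
  rw [dec2ninAltLoop]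
  simp [not_lt.2 h]

lemma altLoop_natCast (m : Nat) : ∀ res place : Int,
    dec2ninAltLoop (m : Int) res place = res + place * nineRep m := by
  induction m using Nat.strong_induction_on with
  | _ m ih =>
    intro res place
    by_cases h0 : m = 0
    · subst h0
      rw [altLoop_nonpos _ _ _ (by norm_num)]
      simp [nineRep]
    · rw [dec2ninAltLoop]
      have hpos : ((m : Int)) > 0 := by exact_mod_cast Nat.pos_of_ne_zero h0
      rw [dif_pos hpos]
      have hd : PySem.Int.floordiv (m : Int) 9 = ((m / 9 : Nat) : Int) := by
        exact_mod_cast PySem.Int.floordiv_natCast m 9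
      have hmo : PySem.Int.mod (m : Int) 9 = ((m % 9 : Nat) : Int) := by
        exact_mod_cast PySem.Int.mod_natCast m 9
      rw [hd, hmo, ih (m / 9) (Nat.div_lt_self (Nat.pos_of_ne_zero h0) (by norm_num))]
      rw [nineRep_unfold m]
      ring

-- ---- A side, first loop ----

lemma digit_run (n : Int) : ∀ (j a : Nat) (digit : Int), a + j < 22 →
    n < 9 ^ (a + j) → (j = 0 ∨ (9 : Int) ^ (a + j - 1) ≤ n) →
    dec2ninDigitLoop n (PySem.List.pyRange (a : Int) 22 1) digit = digit + j := by
  intro j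
  induction j with
  | zero =>
      intro a digit hlt hub _
      rw [PySem.List.pyRange_one_cons (by exact_mod_cast (by omega : a < 22))]
      have hng : ¬ n ≥ 9 ^ ((a : Int)).toNat := by
        simp only [Int.toNat_natCast]
        exact not_le.2 (by simpa using hub)
      simp only [dec2ninDigitLoop]
      rw [if_neg hng]
      simp
  | succ j ih =>
      intro a digit hlt hub hlb
      have hlb' : (9 : Int) ^ (a + j) ≤ n := by
        rcases hlb with h | h
        · exact absurd h (Nat.succ_ne_zero j)
        · simpa using h
      have hguard : n ≥ 9 ^ ((a : Int)).toNat := by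
        simp only [Int.toNat_natCast]
        calc (9 : Int) ^ a ≤ 9 ^ (a + j) := by
              apply pow_le_pow_right₀ (by norm_num) (by omega)
        _ ≤ n := hlb'
      rw [PySem.List.pyRange_one_cons (by exact_mod_cast (by omega : a < 22))]
      simp only [dec2ninDigitLoop, if_pos hguard]
      have hcast : (a : Int) + 1 = ((a + 1 : Nat) : Int) := by push_cast; ring
      rw [hcast, ih (a + 1) (digit + 1) (by omega)
        (by rw [show a + 1 + j = a + (j + 1) by omega]; exact hub)
        (Or.inr (by rw [show a + 1 + j - 1 = a + j by omega]; exact hlb'))]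
      push_cast
      ring

-- ---- A side, second loop ----

lemma step_top (d : Nat) (m : Nat) (acc : Int) :
    dec2ninStep ((d + 1 : Nat) : Int) ((m : Int), acc) ((0 : Nat) : Int)
      = if (m : Int) ≥ 9 ^ d then
          (((m % 9 ^ d : Nat) : Int), acc + ((m / 9 ^ d : Nat) : Int) * 10 ^ d)
        else ((m : Int), acc) := by
  have he : (((d + 1 : Nat) : Int) - (((0 : Nat) : Int) + 1)).toNat = d := by push_cast; omega
  have h9 : ((9 : Int)) ^ d = (((9 ^ d : Nat)) : Int) := by push_cast; ring
  simp only [dec2ninStep, he]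
  by_cases hg : (m : Int) ≥ 9 ^ d
  · rw [if_pos hg, if_pos hg, h9, PySem.Int.mod_natCast, PySem.Int.floordiv_natCast]
  · rw [if_neg hg, if_neg hg]

lemma foldA_eq (d : Nat) : ∀ (m : Nat) (acc : Int), m < 9 ^ d →
    ((List.range d).foldl (fun (st : Int × Int) (k : Nat) => dec2ninStep (d : Int) st (k : Int)) ((m : Int), acc)).2
      = acc + nineRep m := by
  induction d with
  | zero =>
      intro m acc hm
      interval_cases m
      simp [nineRep]
  | succ d ih =>
      intro m acc hm
      rw [List.range_succ_eq_map, List.foldl_cons, List.foldl_map]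
      have hstep : (fun (st : Int × Int) (k : Nat) => dec2ninStep ((d + 1 : Nat) : Int) st ((k.succ : Nat) : Int))
          = fun (st : Int × Int) (k : Nat) => dec2ninStep (d : Int) st (k : Int) := by
        funext st k
        have harg : ((d + 1 : Nat) : Int) - (((k.succ : Nat) : Int) + 1) = (d : Int) - ((k : Int) + 1) := by
          push_cast; ring
        simp only [dec2ninStep, harg]
      rw [show ((d + 1 : Nat) : Int) = (((d + 1 : Nat) : Nat) : Int) from rfl]
      rw [step_top d m acc]
      by_cases hg : (m : Int) ≥ 9 ^ d
      · rw [if_pos hg]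
        rw [hstep, ih (m % 9 ^ d) _ (Nat.mod_lt m (by positivity))]
        rw [nineRep_split d m hm]
        ring
      · rw [if_neg hg]
        rw [hstep, ih m acc (by exact_mod_cast not_le.1 hg)]

-- main A characterization
lemma dec2nin_eq_nineRep (m : Nat) (h1 : 1 ≤ m) (h2 : m < 9 ^ 21) :
    dec2nin (m : Int) = nineRep m := by
  set d := Nat.log 9 m + 1 with hd
  have hml : 9 ^ (d - 1) ≤ m := by
    simpa [hd] using Nat.pow_log_le_self 9 (by omega : m ≠ 0)
  have hmu : m < 9 ^ d := by
    simpa [hd] using Nat.lt_pow_succ_log_self (by norm_num : 1 < 9) m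
  have hd22 : d < 22 := by
    have := Nat.log_lt_of_lt_pow (by omega : m ≠ 0) h2
    omega
  have hdigit : dec2ninDigitLoop (m : Int) (PySem.List.pyRange 0 22 1) 0 = (d : Int) := by
    have := digit_run (m : Int) d 0 0 (by omega)
      (by simp only [Nat.zero_add]; exact_mod_cast hmu)
      (Or.inr (by simp only [Nat.zero_add]; exact_mod_cast hml))
    simpa using this
  show ((PySem.List.pyRange 0 (dec2ninDigitLoop (m : Int) (PySem.List.pyRange 0 22 1) 0) 1).foldl
      (dec2ninStep (dec2ninDigitLoop (m : Int) (PySem.List.pyRange 0 22 1) 0)) ((m : Int), 0)).2 = nineRep m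
  rw [hdigit, PySem.List.pyRange_zero_natCast d, List.foldl_map]
  simpa using foldA_eq d m 0 hmu

-- ===== VERDICT (by name: the statement is the Claim_ definition above) =====
theorem dec2nin_spec : Claim_equal_dec2nin := by
  intro n hdom
  unfold Spec_dec2nin dec2nin_alt
  by_cases hn : n ≤ 0
  · rw [altLoop_nonpos _ _ _ hn]
    have hdigit : dec2ninDigitLoop n (PySem.List.pyRange 0 22 1) 0 = 0 := by
      have := digit_run n 0 0 0 (by omega) (by norm_num; omega) (Or.inl rfl)
      simpa using this
    show ((PySem.List.pyRange 0 (dec2ninDigitLoop n (PySem.List.pyRange 0 22 1) 0) 1).foldl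
        (dec2ninStep (dec2ninDigitLoop n (PySem.List.pyRange 0 22 1) 0)) (n, 0)).2 = 0
    rw [hdigit]
    have : PySem.List.pyRange 0 0 1 = [] := by
      simp [PySem.List.pyRange]
    rw [this]
    rfl
  · have hm : n = ((n.toNat : Nat) : Int) := (Int.toNat_of_nonneg (by omega)).symm
    have hub : n ≤ 2147483648 := by
      have := hdom
      simp only [Dom_dec2nin, pvDomInt, decide_eq_true_eq] at this
      omega
    have h21 : (2147483649 : Nat) ≤ 9 ^ 21 := by norm_num
    rw [hm, dec2nin_eq_nineRep n.toNat (by omega) (by omega)]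
    rw [altLoop_natCast]
    ring
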